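-- pv_equiv track=rewrite | github.com/Dedzsinator/Zha | backend/models/markov_chain.py | _map_notes_to_chords
-- ===== SOURCE A (Python) =====
-- def _map_notes_to_chords(notes, durations, chords):
--     """Map each note to the appropriate chord in the progression"""
--     if not notes or not chords:
--         return []
--
--     chord_sequence = []
--     total_notes = len(notes)
--     notes_per_chord = max(1, total_notes // len(chords))
--
--     for i in range(total_notes):
--         chord_idx = min(i // notes_per_chord, len(chords) - 1)
--         chord_sequence.append(chords[chord_idx])
--
--     return chord_sequence
-- ===== SOURCE B (Python) =====
-- def _map_notes_to_chords(notes, durations, chords):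
--     """Map each note to the appropriate chord in the progression."""
--     if not notes or not chords:
--         return []
--
--     notes_per_chord = max(1, len(notes) // len(chords))
--     last = len(chords) - 1
--     out = []
--     remaining = len(notes)
--     for k, ch in enumerate(chords):
--         take = remaining if k == last else min(notes_per_chord, remaining)
--         out.extend([ch] * take)
--         remaining -= take
--     return out
-- ===== Notes on version B (the rewrite author's own statement) =====
-- stated objective: alternative
-- what changed: B builds the sequence as runs by iterating over the chords (each chord emits a block of notes_per_chord copies, capped by the notes remaining, with the last chord absorbing all remaining notes), instead of computing a chord index for every note.
import Mathlib
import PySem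

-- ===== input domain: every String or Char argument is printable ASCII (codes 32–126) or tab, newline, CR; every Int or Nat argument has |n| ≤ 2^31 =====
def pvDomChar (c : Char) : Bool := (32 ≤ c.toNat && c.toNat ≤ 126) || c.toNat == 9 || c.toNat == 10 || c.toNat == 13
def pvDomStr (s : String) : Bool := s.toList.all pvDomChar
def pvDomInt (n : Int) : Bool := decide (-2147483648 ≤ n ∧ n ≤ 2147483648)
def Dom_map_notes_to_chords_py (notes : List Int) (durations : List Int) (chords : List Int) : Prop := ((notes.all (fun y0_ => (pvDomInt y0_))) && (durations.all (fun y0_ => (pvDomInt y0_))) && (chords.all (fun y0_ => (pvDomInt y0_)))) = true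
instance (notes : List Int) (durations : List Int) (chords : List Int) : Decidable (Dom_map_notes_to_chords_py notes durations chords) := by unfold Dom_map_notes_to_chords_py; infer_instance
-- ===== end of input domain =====

-- B rebuilds the chord sequence as runs per chord (each chord emits a capped block, the last absorbs the rest) instead of computing a chord index per note; objective: alternative decomposition, same cost.


-- ===== PORT A =====
def map_notes_to_chords_py (notes : List Int) (durations : List Int) (chords : List Int) : List Int :=
  if notes = [] ∨ chords = [] then []
  else
    let total : Int := (notes.length : Int)
    let npc : Int := max 1 (PySem.Int.floordiv total (chords.length : Int))
    (PySem.List.pyRange 0 total 1).foldl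
      (fun acc i =>
        acc ++ [PySem.List.pyGetD chords (min (PySem.Int.floordiv i npc) ((chords.length : Int) - 1)) 0]) []

-- ===== PORT B =====
def map_notes_to_chords_py_alt (notes : List Int) (durations : List Int) (chords : List Int) : List Int :=
  if notes = [] ∨ chords = [] then []
  else
    let npc : Int := max 1 (PySem.Int.floordiv (notes.length : Int) (chords.length : Int))
    let last : Int := (chords.length : Int) - 1
    ((PySem.List.enumerate chords 0).foldl
      (fun st p =>
        let take : Int := if p.1 = last then st.2 else min npc st.2
        (st.1 ++ PySem.List.pyRepeat [p.2] take, st.2 - take))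
      ([], (notes.length : Int))).1

-- ===== PRECONDITION & SPEC =====
def Spec_map_notes_to_chords_py (notes : List Int) (durations : List Int) (chords : List Int) (out : List Int) : Prop := out = map_notes_to_chords_py_alt notes durations chords
instance (notes : List Int) (durations : List Int) (chords : List Int) (out : List Int) : Decidable (Spec_map_notes_to_chords_py notes durations chords out) := by unfold Spec_map_notes_to_chords_py; infer_instance

-- ===== CLAIM (what is proved, stated in full; the proofs are below) =====
def Claim_equal_map_notes_to_chords_py : Prop := ∀ (notes : List Int) (durations : List Int) (chords : List Int), Dom_map_notes_to_chords_py notes durations chords → Spec_map_notes_to_chords_py notes durations chords (map_notes_to_chords_py notes durations chords)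

-- ===== LEMMAS AND PROOFS =====

-- ===== VERDICT (by name: the statement is the Claim_ definition above) =====
-- per-note characterisation of A's loop body, in Nat arithmetic
def Acore (P : Nat) (cs : List Int) (n : Nat) : List Int :=
  (List.range n).map (fun k => cs.getD (min (k / P) (cs.length - 1)) 0)

-- run-length characterisation of B's loop, in Nat arithmetic
def Bcore (P : Nat) : List Int → Nat → List Int
  | [], _ => []
  | [ch], r => List.replicate r ch
  | ch :: c2 :: cs, r =>
      List.replicate (min P r) ch ++ Bcore P (c2 :: cs) (r - min P r)

lemma Bcore_zero (P : Nat) (cs : List Int) : Bcore P cs 0 = [] := by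
  induction cs with
  | nil => rfl
  | cons ch cs ih =>
      cases cs with
      | nil => rfl
      | cons c2 cs' => simpa [Bcore] using ih

lemma core_eq (P : Nat) (hP : 1 ≤ P) :
    ∀ (cs : List Int), cs ≠ [] → ∀ n, Acore P cs n = Bcore P cs n := by
  intro cs
  induction cs with
  | nil => intro h; exact absurd rfl h
  | cons ch cs ih =>
      intro _ n
      cases cs with
      | nil =>
          simp [Acore, Bcore, List.map_const']
      | cons c2 cs' =>
          have ht : min P n ≤ n := Nat.min_le_right _ _
          have hsplit : List.range n =
              List.range (min P n) ++ (List.range (n - min P n)).map (fun j => min P n + j) := by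
            conv_lhs => rw [← Nat.add_sub_cancel' ht]
            exact List.range_add
          have head_eq : (List.range (min P n)).map
              (fun k => (ch :: c2 :: cs').getD (min (k / P) ((ch :: c2 :: cs').length - 1)) 0)
              = List.replicate (min P n) ch := by
            rw [List.eq_replicate_iff]
            constructor
            · simp
            · intro b hb
              simp only [List.mem_map, List.mem_range] at hb
              obtain ⟨k, hk, rfl⟩ := hb
              have hkP : k < P := lt_of_lt_of_le hk (Nat.min_le_left _ _)
              have : k / P = 0 := Nat.div_eq_of_lt hkP
              simp [this]
          by_cases hPn : P ≤ n
          · have htP : min P n = P := Nat.min_eq_left hPn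
            have tail_eq : ((List.range (n - min P n)).map (fun j => min P n + j)).map
                (fun k => (ch :: c2 :: cs').getD (min (k / P) ((ch :: c2 :: cs').length - 1)) 0)
                = Acore P (c2 :: cs') (n - P) := by
              rw [htP, List.map_map]
              apply List.map_congr_left
              intro j _
              simp only [Function.comp]
              have h1 : (P + j) / P = 1 + j / P := by
                rw [Nat.add_comm P j, Nat.add_div_right _ (by omega)]
                omega
              have h2 : (ch :: c2 :: cs').length - 1 = 1 + ((c2 :: cs').length - 1) := by
                simp; omega
              have h3 : min (1 + j / P) (1 + ((c2 :: cs').length - 1))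
                  = 1 + min (j / P) ((c2 :: cs').length - 1) := by omega
              rw [h1, h2, h3, Nat.add_comm 1 _, List.getD_cons_succ]
            unfold Acore
            rw [hsplit, List.map_append, head_eq, tail_eq, ih (by simp) (n - P),
              Bcore, htP]
          · have htn : min P n = n := Nat.min_eq_right (by omega)
            unfold Acore
            rw [hsplit, List.map_append, head_eq, htn]
            simp [Bcore, htn, Bcore_zero]

-- B's fold over the enumerated chord list computes Bcore
lemma fold_eq_Bcore (npc L : Int) (hnpc : 1 ≤ npc) :
    ∀ (cs : List Int), cs ≠ [] → ∀ (s : Int) (r : Nat) (acc : List Int),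
      s + (cs.length : Int) = L + 1 →
      ((PySem.List.enumerate cs s).foldl
        (fun st p =>
          (st.1 ++ PySem.List.pyRepeat [p.2] (if p.1 = L then st.2 else min npc st.2),
           st.2 - (if p.1 = L then st.2 else min npc st.2)))
        (acc, (r : Int))).1 = acc ++ Bcore npc.toNat cs r := by
  intro cs
  induction cs with
  | nil => intro h; exact absurd rfl h
  | cons ch cs ih =>
      intro _ s r acc hs
      cases cs with
      | nil =>
          have hsL : s = L := by simpa using hs
          simp [PySem.List.enumerate_cons, PySem.List.enumerate_nil, hsL,
            PySem.List.pyRepeat_singleton, Bcore]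
      | cons c2 cs' =>
          have hne : s ≠ L := by
            simp only [List.length_cons] at hs
            omega
          have htake : min npc (r : Int) = ((min npc.toNat r : Nat) : Int) := by
            rw [Nat.cast_min, Int.toNat_of_nonneg (by omega)]
          have hrest : (r : Int) - min npc (r : Int) = ((r - min npc.toNat r : Nat) : Int) := by
            rw [htake, ← Nat.cast_sub (Nat.min_le_right _ _)]
          rw [PySem.List.enumerate_cons]
          simp only [List.foldl_cons, hne, if_false]
          rw [hrest, htake]
          rw [ih (by simp) (s + 1) (r - min npc.toNat r)
              (acc ++ PySem.List.pyRepeat [ch] ((min npc.toNat r : Nat) : Int))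
              (by simp only [List.length_cons] at hs ⊢; push_cast at hs ⊢; omega)]
          rw [PySem.List.pyRepeat_singleton]
          have : ((min npc.toNat r : Nat) : Int).toNat = min npc.toNat r := by omega
          rw [this]
          simp [Bcore, List.append_assoc]

-- ===== VERDICT (by name: the statement is the Claim_ definition above) =====
theorem map_notes_to_chords_py_spec : Claim_equal_map_notes_to_chords_py := by
  unfold Claim_equal_map_notes_to_chords_py Spec_map_notes_to_chords_py
  intro notes durations chords _
  unfold map_notes_to_chords_py map_notes_to_chords_py_alt
  by_cases hguard : notes = [] ∨ chords = []
  · simp only [hguard, if_true]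
  · rw [if_neg hguard, if_neg hguard]
    have hn : notes ≠ [] := fun h => hguard (Or.inl h)
    have hc : chords ≠ [] := fun h => hguard (Or.inr h)
    simp only []
    set P : Nat := max 1 (notes.length / chords.length) with hPdef
    have hPI : max 1 (PySem.Int.floordiv (notes.length : Int) (chords.length : Int)) = (P : Int) := by
      rw [PySem.Int.floordiv_natCast]
      omega
    have hP1 : 1 ≤ P := le_max_left _ _
    rw [hPI]
    have hA : (PySem.List.pyRange 0 (notes.length : Int) 1).foldl
        (fun acc i =>
          acc ++ [PySem.List.pyGetD chords
            (min (PySem.Int.floordiv i ((P : Int))) ((chords.length : Int) - 1)) 0]) []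
        = Acore P chords notes.length := by
      rw [PySem.List.foldl_append_singleton_eq_map, List.nil_append,
        PySem.List.pyRange_zero_natCast]
      unfold Acore
      rw [List.map_map]
      apply List.map_congr_left
      intro k hk
      simp only [Function.comp]
      rw [PySem.Int.floordiv_natCast k P]
      have hclen : 1 ≤ chords.length := List.length_pos_iff.mpr hc
      have h2 : min (((k / P : Nat)) : Int) ((chords.length : Int) - 1)
          = ((min (k / P) (chords.length - 1) : Nat) : Int) := by
        omega
      rw [h2, PySem.List.pyGetD_natCast]
    have hB : ((PySem.List.enumerate chords 0).foldl
        (fun st p =>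
          (st.1 ++ PySem.List.pyRepeat [p.2]
             (if p.1 = (chords.length : Int) - 1 then st.2 else min ((P : Int)) st.2),
           st.2 - (if p.1 = (chords.length : Int) - 1 then st.2 else min ((P : Int)) st.2)))
        ([], (notes.length : Int))).1 = Bcore P chords notes.length := by
      have := fold_eq_Bcore (P : Int) ((chords.length : Int) - 1) (by exact_mod_cast hP1)
        chords hc 0 notes.length [] (by ring)
      simpa using this
    rw [hA, hB]
    exact core_eq P hP1 chords hc notes.length
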